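-- pv_equiv track=rewrite | github.com/VeriGOOD-ML/public | genesys/genesys/test/scratch/sa_test.py | store_output_tile
-- ===== SOURCE A (Python) =====
-- def store_output_tile(all_tiling, output_shape, O_BASE_ADDR, OBUF_TILE, O):
--     N, OH, OW, OC = output_shape
--     for n in range(all_tiling["N"]):
--         for y in range(all_tiling["OH"]):
--             for x in range(all_tiling["OW"]):
--                 for oc in range(all_tiling["OC"]):
--                     OBUF_BASE_ADDR = n * all_tiling["OH"] * all_tiling["OW"] * all_tiling["OC"]
--                     OBUF_BASE_ADDR += y * all_tiling["OW"] * all_tiling["OC"]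
--                     OBUF_BASE_ADDR += x * all_tiling["OC"]
--                     OBUF_BASE_ADDR += oc
--                     OUTPUT_BASE_OFFSET = n * OH * OW * OC
--                     OUTPUT_BASE_OFFSET += y * OW * OC
--                     OUTPUT_BASE_OFFSET += x * OC
--                     OUTPUT_BASE_OFFSET += oc
--                     O[O_BASE_ADDR + OUTPUT_BASE_OFFSET] = OBUF_TILE[OBUF_BASE_ADDR]
--     return O
-- ===== SOURCE B (Python) =====
-- def store_output_tile(all_tiling, output_shape, O_BASE_ADDR, OBUF_TILE, O):
--     # Same in-place mutation of O as the original (per-run slice writes), returns O.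
--     N, OH, OW, OC = output_shape
--     for n in range(all_tiling["N"]):
--         th = all_tiling["OH"]
--         for y in range(th):
--             dst = O_BASE_ADDR + n * OH * OW * OC + y * OW * OC
--             for x in range(all_tiling["OW"]):
--                 tw, tc = all_tiling["OW"], all_tiling["OC"]
--                 src = (n * th + y) * tw * tc + x * tc
--                 O[dst + x * OC : dst + x * OC + tc] = OBUF_TILE[src : src + tc]
--     return O
-- ===== Notes on version B (the rewrite author's own statement) =====
-- stated objective: alternative
-- what changed: A's four nested loops write one element at a time, recomputing both flat addresses from scratch per element; B drops the innermost loop, hoists the destination base address to the (n,y) level and copies each contiguous OC-run with a single slice assignment.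
import Mathlib
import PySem

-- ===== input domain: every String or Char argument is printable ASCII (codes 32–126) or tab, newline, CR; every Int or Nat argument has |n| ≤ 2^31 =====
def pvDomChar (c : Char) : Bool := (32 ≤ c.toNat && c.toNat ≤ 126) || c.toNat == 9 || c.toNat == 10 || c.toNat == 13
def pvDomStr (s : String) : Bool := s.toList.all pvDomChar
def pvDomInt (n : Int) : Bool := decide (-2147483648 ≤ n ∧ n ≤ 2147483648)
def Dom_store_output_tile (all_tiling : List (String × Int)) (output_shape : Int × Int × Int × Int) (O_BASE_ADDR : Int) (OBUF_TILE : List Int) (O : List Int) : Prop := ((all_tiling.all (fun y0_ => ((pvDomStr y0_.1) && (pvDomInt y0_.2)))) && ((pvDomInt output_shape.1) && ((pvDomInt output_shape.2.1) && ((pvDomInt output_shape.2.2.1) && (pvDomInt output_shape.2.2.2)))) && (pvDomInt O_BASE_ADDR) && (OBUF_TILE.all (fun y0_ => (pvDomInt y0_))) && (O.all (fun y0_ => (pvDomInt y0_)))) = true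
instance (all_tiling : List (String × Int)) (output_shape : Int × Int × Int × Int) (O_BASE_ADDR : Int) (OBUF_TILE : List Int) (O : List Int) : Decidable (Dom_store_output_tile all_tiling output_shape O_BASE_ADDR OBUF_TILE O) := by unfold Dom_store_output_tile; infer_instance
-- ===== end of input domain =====

-- B replaces A's innermost element-by-element copy loop by one contiguous slice copy per
-- (n, y, x) run with hoisted base-address computation (same in-place mutation of O as A).

-- ===== PORT A =====
-- Literal port of A's four nested loops; dict lookups are ported with getD (the missing-key
-- KeyError inputs are excluded by Pre_), element reads/writes with pyGetD/pySetD (the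
-- out-of-range IndexError inputs and negative wrapping indices are excluded by Pre_).
def store_output_tile (all_tiling : List (String × Int)) (output_shape : Int × Int × Int × Int) (O_BASE_ADDR : Int) (OBUF_TILE : List Int) (O : List Int) : List Int :=
  let OH := output_shape.2.1
  let OW := output_shape.2.2.1
  let OC := output_shape.2.2.2
  let d := PySem.Dict.mk all_tiling
  (PySem.List.pyRange 0 (d.getD "N" 0) 1).foldl (fun O1 n =>
    (PySem.List.pyRange 0 (d.getD "OH" 0) 1).foldl (fun O2 y =>
      (PySem.List.pyRange 0 (d.getD "OW" 0) 1).foldl (fun O3 x =>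
        (PySem.List.pyRange 0 (d.getD "OC" 0) 1).foldl (fun O4 oc =>
          PySem.List.pySetD O4
            (O_BASE_ADDR + (n * OH * OW * OC + y * OW * OC + x * OC + oc))
            (PySem.List.pyGetD OBUF_TILE
              (n * (d.getD "OH" 0) * (d.getD "OW" 0) * (d.getD "OC" 0)
                + y * (d.getD "OW" 0) * (d.getD "OC" 0) + x * (d.getD "OC" 0) + oc) 0))
          O3) O2) O1) O

-- ===== PORT B =====
-- Hand port of Python's list slice assignment xs[a:b] = v (step 1): exact for every Int a, b
-- (start and stop clamped like slice bounds, stop additionally clamped up to the start).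
def pySliceAssign (xs : List Int) (a b : Int) (v : List Int) : List Int :=
  let i := PySem.List.clampIdx xs.length a
  let j := max i (PySem.List.clampIdx xs.length b)
  xs.take i ++ v ++ xs.drop j

def store_output_tile_alt (all_tiling : List (String × Int)) (output_shape : Int × Int × Int × Int) (O_BASE_ADDR : Int) (OBUF_TILE : List Int) (O : List Int) : List Int :=
  let OH := output_shape.2.1
  let OW := output_shape.2.2.1
  let OC := output_shape.2.2.2
  let d := PySem.Dict.mk all_tiling
  (PySem.List.pyRange 0 (d.getD "N" 0) 1).foldl (fun O1 n =>
    let th := d.getD "OH" 0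
    (PySem.List.pyRange 0 th 1).foldl (fun O2 y =>
      let dst := O_BASE_ADDR + n * OH * OW * OC + y * OW * OC
      (PySem.List.pyRange 0 (d.getD "OW" 0) 1).foldl (fun O3 x =>
        let tw := d.getD "OW" 0
        let tc := d.getD "OC" 0
        let src := (n * th + y) * tw * tc + x * tc
        pySliceAssign O3 (dst + x * OC) (dst + x * OC + tc)
          (PySem.List.slice OBUF_TILE (some src) (some (src + tc))))
        O2) O1) O

-- ===== PRECONDITION & SPEC =====
-- Pre_ requires each tiling key A actually looks up to be present (a missing key makes A raise
-- KeyError), every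
-- computed source/destination index to be non-negative and in range (out of range makes A raise
-- IndexError; a negative index makes A wrap around to the end of the list — an accident of
-- Python's negative indexing on what is meant to be a flat hardware address, which no caller
-- would specify and which B's contiguous block copy has no reason to reproduce), and, when the
-- three outer loops run at all, a non-negative OC tile count (a negative count is a nonsense tile
-- which A happens to treat as 'copy nothing' while B's negative-width slices clamp accidentally).
def Pre_store_output_tile (all_tiling : List (String × Int)) (output_shape : Int × Int × Int × Int) (O_BASE_ADDR : Int) (OBUF_TILE : List Int) (O : List Int) : Prop :=
  let OH := output_shape.2.1
  let OW := output_shape.2.2.1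
  let OC := output_shape.2.2.2
  let d := PySem.Dict.mk all_tiling
  d.contains "N" = true ∧
  (0 < d.getD "N" 0 → d.contains "OH" = true) ∧
  (0 < d.getD "N" 0 ∧ 0 < d.getD "OH" 0 → d.contains "OW" = true) ∧
  (0 < d.getD "N" 0 ∧ 0 < d.getD "OH" 0 ∧ 0 < d.getD "OW" 0 → d.contains "OC" = true) ∧
  (d.getD "OC" 0 < 0 → d.getD "N" 0 ≤ 0 ∨ d.getD "OH" 0 ≤ 0 ∨ d.getD "OW" 0 ≤ 0) ∧
  ∀ n ∈ PySem.List.pyRange 0 (d.getD "N" 0) 1, ∀ y ∈ PySem.List.pyRange 0 (d.getD "OH" 0) 1,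
  ∀ x ∈ PySem.List.pyRange 0 (d.getD "OW" 0) 1, ∀ oc ∈ PySem.List.pyRange 0 (d.getD "OC" 0) 1,
    (0 ≤ n * (d.getD "OH" 0) * (d.getD "OW" 0) * (d.getD "OC" 0)
          + y * (d.getD "OW" 0) * (d.getD "OC" 0) + x * (d.getD "OC" 0) + oc ∧
     n * (d.getD "OH" 0) * (d.getD "OW" 0) * (d.getD "OC" 0)
          + y * (d.getD "OW" 0) * (d.getD "OC" 0) + x * (d.getD "OC" 0) + oc < OBUF_TILE.length) ∧
    (0 ≤ O_BASE_ADDR + (n * OH * OW * OC + y * OW * OC + x * OC + oc) ∧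
     O_BASE_ADDR + (n * OH * OW * OC + y * OW * OC + x * OC + oc) < O.length)
instance (all_tiling : List (String × Int)) (output_shape : Int × Int × Int × Int) (O_BASE_ADDR : Int) (OBUF_TILE : List Int) (O : List Int) : Decidable (Pre_store_output_tile all_tiling output_shape O_BASE_ADDR OBUF_TILE O) := by unfold Pre_store_output_tile; infer_instance

def pvWitness_store_output_tile : (List (String × Int)) × (Int × Int × Int × Int) × Int × List Int × List Int :=
  ([("N", 1), ("OH", 1), ("OW", 1), ("OC", 1)], (1, 1, 1, 1), 0, [7], [0])

def Spec_store_output_tile (all_tiling : List (String × Int)) (output_shape : Int × Int × Int × Int) (O_BASE_ADDR : Int) (OBUF_TILE : List Int) (O : List Int) (out : List Int) : Prop := out = store_output_tile_alt all_tiling output_shape O_BASE_ADDR OBUF_TILE O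
instance (all_tiling : List (String × Int)) (output_shape : Int × Int × Int × Int) (O_BASE_ADDR : Int) (OBUF_TILE : List Int) (O : List Int) (out : List Int) : Decidable (Spec_store_output_tile all_tiling output_shape O_BASE_ADDR OBUF_TILE O out) := by unfold Spec_store_output_tile; infer_instance

-- ===== CLAIM (what is proved, stated in full; the proofs are below) =====
def Claim_equal_store_output_tile : Prop := ∀ (all_tiling : List (String × Int)) (output_shape : Int × Int × Int × Int) (O_BASE_ADDR : Int) (OBUF_TILE : List Int) (O : List Int), Dom_store_output_tile all_tiling output_shape O_BASE_ADDR OBUF_TILE O → Pre_store_output_tile all_tiling output_shape O_BASE_ADDR OBUF_TILE O → Spec_store_output_tile all_tiling output_shape O_BASE_ADDR OBUF_TILE O (store_output_tile all_tiling output_shape O_BASE_ADDR OBUF_TILE O)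

-- ===== LEMMAS AND PROOFS =====

-- foldl congruence carrying an invariant of the left body along the fold
lemma foldl_congr_inv {α β : Type} (P : α → Prop) (f g : α → β → α) :
    ∀ (l : List β) (s : α), P s → (∀ a, P a → ∀ b ∈ l, f a b = g a b ∧ P (f a b)) →
      l.foldl f s = l.foldl g s ∧ P (l.foldl f s) := by
  intro l
  induction l with
  | nil => intro s hs _; exact ⟨rfl, hs⟩
  | cons b t ih =>
    intro s hs h
    obtain ⟨hfg, hP⟩ := h s hs b (by simp)
    simp only [List.foldl_cons]
    have := ih (f s b) hP (fun a ha b' hb' => h a ha b' (List.mem_cons_of_mem _ hb'))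
    rw [← hfg]
    exact this

-- a fold of pySetD writes never changes the length
lemma foldl_pySetD_length (l : List Int) (idx val : Int → Int) :
    ∀ (s : List Int), (l.foldl (fun acc oc => PySem.List.pySetD acc (idx oc) (val oc)) s).length = s.length := by
  induction l with
  | nil => intro s; rfl
  | cons b t ih =>
    intro s
    simp only [List.foldl_cons]
    rw [ih]
    exact PySem.List.length_pySetD s (idx b) (val b)

lemma clampIdx_of_nonneg_le (n : Nat) {a : Int} (h0 : 0 ≤ a) (hn : a ≤ n) :
    PySem.List.clampIdx n a = a.toNat := by
  simp only [PySem.List.clampIdx]; split_ifs <;> omega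

-- pyRange 0 b is empty for b ≤ 0
lemma pyRange_nonpos {b : Int} (h : b ≤ 0) : PySem.List.pyRange 0 b 1 = [] := by
  apply List.eq_nil_iff_forall_not_mem.mpr
  intro x hx
  have := PySem.List.mem_pyRange_one.mp hx
  omega

-- one inner run of A (consecutive element writes) is a splice
lemma run_lemma (OBUF : List Int) (dI s : Int) (m : Nat) (M : List Int)
    (hd0 : 0 ≤ dI) (hdm : dI.toNat + m ≤ M.length) (hs0 : 0 ≤ s) (hsm : s.toNat + m ≤ OBUF.length) :
    (List.range m).foldl
        (fun acc (oc : Nat) => PySem.List.pySetD acc (dI + (oc : Int)) (PySem.List.pyGetD OBUF (s + (oc : Int)) 0)) M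
      = M.take dI.toNat ++ (OBUF.drop s.toNat).take m ++ M.drop (dI.toNat + m) := by
  induction m with
  | zero =>
    simp only [List.range_zero, List.foldl_nil, List.take_zero, Nat.add_zero, List.append_nil]
    rw [List.take_append_drop]
  | succ m ih =>
    have hdm' : dI.toNat + m ≤ M.length := by omega
    have hsm' : s.toNat + m ≤ OBUF.length := by omega
    rw [List.range_succ, List.foldl_append, ih hdm' hsm']
    simp only [List.foldl_cons, List.foldl_nil]
    have hval : PySem.List.pyGetD OBUF (s + (m : Int)) 0 = OBUF[s.toNat + m]'(by omega) := by
      rw [PySem.List.pyGetD_of_nonneg OBUF 0 (by omega)]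
      rw [List.getD_eq_getElem _ _ (by omega)]
      congr 1; omega
    have hidx : ((dI + (m : Int))).toNat = dI.toNat + m := by omega
    rw [PySem.List.pySetD_of_nonneg _ _ (by omega), hidx, hval]
    have hlen1 : (M.take dI.toNat).length = dI.toNat := by simp; omega
    have hlen2 : ((OBUF.drop s.toNat).take m).length = m := by simp; omega
    rw [List.set_append, if_neg (by simp only [List.length_append, hlen1, hlen2]; omega)]
    rw [List.length_append, hlen1, hlen2]
    have hsub : dI.toNat + m - (dI.toNat + m) = 0 := by omega
    rw [hsub, List.drop_eq_getElem_cons (by omega : dI.toNat + m < M.length), List.set_cons_zero]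
    rw [List.take_add_one, List.getElem?_eq_getElem (by simp only [List.length_drop]; omega : m < (OBUF.drop s.toNat).length)]
    simp only [List.getElem_drop, Option.toList_some, List.append_assoc, List.cons_append,
      List.nil_append]
    congr 2

-- A's innermost per-element copy loop equals B's one slice copy (given in-range bounds)
lemma xbody_eq (OBUF M : List Int) (dI sI tc : Int) (h0 : 0 ≤ tc)
    (hb : 0 < tc → (0 ≤ dI ∧ dI + tc ≤ M.length) ∧ (0 ≤ sI ∧ sI + tc ≤ OBUF.length)) :
    (PySem.List.pyRange 0 tc 1).foldl
        (fun O4 oc => PySem.List.pySetD O4 (dI + oc) (PySem.List.pyGetD OBUF (sI + oc) 0)) M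
      = pySliceAssign M dI (dI + tc) (PySem.List.slice OBUF (some sI) (some (sI + tc))) := by
  by_cases htc : 0 < tc
  · obtain ⟨⟨hd0, hdt⟩, hs0, hst⟩ := hb htc
    have hr : PySem.List.pyRange 0 tc 1 = (List.range tc.toNat).map (fun (k : Nat) => (k : Int)) := by
      conv_lhs => rw [← Int.toNat_of_nonneg htc.le]
      exact PySem.List.pyRange_zero_natCast tc.toNat
    rw [hr, List.foldl_map]
    rw [run_lemma OBUF dI sI tc.toNat M hd0 (by omega) hs0 (by omega)]
    rw [PySem.List.slice_toNat OBUF hs0 (by omega)]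
    simp only [pySliceAssign]
    rw [clampIdx_of_nonneg_le M.length hd0 (by omega),
        clampIdx_of_nonneg_le M.length (a := dI + tc) (by omega) (by omega)]
    have h1 : (sI + tc).toNat - sI.toNat = tc.toNat := by omega
    have h2 : max dI.toNat (dI + tc).toNat = (dI + tc).toNat := by omega
    have h3 : (dI + tc).toNat = dI.toNat + tc.toNat := by omega
    rw [h1, h2, h3]
  · have htc0 : tc = 0 := by omega
    subst htc0
    rw [pyRange_nonpos le_rfl]
    simp only [List.foldl_nil, pySliceAssign, Int.add_zero, max_self]
    have hv : PySem.List.slice OBUF (some sI) (some sI) = [] := by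
      apply List.eq_nil_of_length_eq_zero
      rw [PySem.List.length_slice]
      omega
    rw [hv]
    simp only [List.append_nil]
    rw [List.take_append_drop]

-- ===== VERDICT (by name: the statement is the Claim_ definition above) =====
theorem store_output_tile_spec : Claim_equal_store_output_tile := by
  intro all_tiling output_shape O_BASE_ADDR OBUF_TILE O _hDom hPre
  obtain ⟨-, -, -, -, hOC, hb⟩ := hPre
  unfold Spec_store_output_tile
  simp only [store_output_tile, store_output_tile_alt]
  refine (foldl_congr_inv (fun M => M.length = O.length) _ _ _ O rfl ?_).1
  intro M hM n hn
  refine foldl_congr_inv (fun M' => M'.length = O.length) _ _ _ M hM ?_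
  intro M2 hM2 y hy
  refine foldl_congr_inv (fun M' => M'.length = O.length) _ _ _ M2 hM2 ?_
  intro M3 hM3 x hx
  constructor
  · -- the x-bodies agree
    have hn' := PySem.List.mem_pyRange_one.mp hn
    have hy' := PySem.List.mem_pyRange_one.mp hy
    have hx' := PySem.List.mem_pyRange_one.mp hx
    have htc0 : (0 : Int) ≤ (PySem.Dict.mk all_tiling).getD "OC" 0 := by
      by_contra hneg
      rcases hOC (by omega) with h | h | h <;> omega
    have hfun : (fun (O4 : List Int) (oc : Int) =>
        PySem.List.pySetD O4
          (O_BASE_ADDR + (n * output_shape.2.1 * output_shape.2.2.1 * output_shape.2.2.2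
            + y * output_shape.2.2.1 * output_shape.2.2.2 + x * output_shape.2.2.2 + oc))
          (PySem.List.pyGetD OBUF_TILE
            (n * ((PySem.Dict.mk all_tiling).getD "OH" 0) * ((PySem.Dict.mk all_tiling).getD "OW" 0) * ((PySem.Dict.mk all_tiling).getD "OC" 0)
              + y * ((PySem.Dict.mk all_tiling).getD "OW" 0) * ((PySem.Dict.mk all_tiling).getD "OC" 0)
              + x * ((PySem.Dict.mk all_tiling).getD "OC" 0) + oc) 0))
      = (fun (O4 : List Int) (oc : Int) =>
        PySem.List.pySetD O4
          ((O_BASE_ADDR + n * output_shape.2.1 * output_shape.2.2.1 * output_shape.2.2.2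
            + y * output_shape.2.2.1 * output_shape.2.2.2 + x * output_shape.2.2.2) + oc)
          (PySem.List.pyGetD OBUF_TILE
            (((n * ((PySem.Dict.mk all_tiling).getD "OH" 0) + y) * ((PySem.Dict.mk all_tiling).getD "OW" 0) * ((PySem.Dict.mk all_tiling).getD "OC" 0)
              + x * ((PySem.Dict.mk all_tiling).getD "OC" 0)) + oc) 0)) := by
      funext O4 oc
      have e1 : O_BASE_ADDR + (n * output_shape.2.1 * output_shape.2.2.1 * output_shape.2.2.2
            + y * output_shape.2.2.1 * output_shape.2.2.2 + x * output_shape.2.2.2 + oc)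
          = (O_BASE_ADDR + n * output_shape.2.1 * output_shape.2.2.1 * output_shape.2.2.2
            + y * output_shape.2.2.1 * output_shape.2.2.2 + x * output_shape.2.2.2) + oc := by ring
      have e2 : n * ((PySem.Dict.mk all_tiling).getD "OH" 0) * ((PySem.Dict.mk all_tiling).getD "OW" 0) * ((PySem.Dict.mk all_tiling).getD "OC" 0)
              + y * ((PySem.Dict.mk all_tiling).getD "OW" 0) * ((PySem.Dict.mk all_tiling).getD "OC" 0)
              + x * ((PySem.Dict.mk all_tiling).getD "OC" 0) + oc
          = ((n * ((PySem.Dict.mk all_tiling).getD "OH" 0) + y) * ((PySem.Dict.mk all_tiling).getD "OW" 0) * ((PySem.Dict.mk all_tiling).getD "OC" 0)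
              + x * ((PySem.Dict.mk all_tiling).getD "OC" 0)) + oc := by ring
      rw [e1, e2]
    rw [hfun]
    apply xbody_eq OBUF_TILE M3 _ _ _ htc0
    intro htc
    have hb0 := hb n hn y hy x hx 0 (PySem.List.mem_pyRange_one.mpr ⟨le_refl 0, htc⟩)
    have hb1 := hb n hn y hy x hx (((PySem.Dict.mk all_tiling).getD "OC" 0) - 1)
      (PySem.List.mem_pyRange_one.mpr ⟨by omega, by omega⟩)
    obtain ⟨⟨hs0, hs1⟩, hd0, hd1⟩ := hb0
    obtain ⟨⟨hs0', hs1'⟩, hd0', hd1'⟩ := hb1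
    rw [hM3]
    constructor
    · constructor
      · linarith
      · linarith
    · constructor
      · linarith
      · linarith
  · -- the x-body of A preserves the length
    rw [← hM3]
    exact foldl_pySetD_length _ _ _ M3
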